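-- pv_equiv track=rewrite | github.com/ClickHouse/ClickHouse | tests/integration/test_refreshable_mat_view/schedule_model.py | group_and_sort
-- ===== SOURCE A (Python) =====
-- def group_and_sort(parts, reverse=False):
--     order = ["YEAR", "MONTH", "WEEK", "DAY", "HOUR", "MINUTE", "SECOND"]
--     grouped_parts = []
--
--     for i in range(0, len(parts), 2):
--         grouped_parts.append((parts[i], parts[i + 1]))
--
--     sorted_parts = sorted(
--         grouped_parts, key=lambda x: order.index(x[1]), reverse=reverse
--     )
--     return sorted_parts
-- ===== SOURCE B (Python) =====
-- def group_and_sort(parts, reverse=False):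
--     order = ["YEAR", "MONTH", "WEEK", "DAY", "HOUR", "MINUTE", "SECOND"]
--     buckets = {u: [] for u in order}
--     it = iter(parts)
--     for name in it:
--         unit = next(it)
--         buckets[unit].append((name, unit))
--     units = order[::-1] if reverse else order
--     return [p for u in units for p in buckets[u]]
-- ===== Notes on version B (the rewrite author's own statement) =====
-- stated objective: alternative
-- what changed: Replaces A's index-stepping pairing loop and key-based comparison sort with an iterator pairing loop that fills a dict of per-unit buckets in one pass, then concatenates the buckets in unit-priority order (reversed category order for reverse=True, preserving stable tie order).
import Mathlib
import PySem

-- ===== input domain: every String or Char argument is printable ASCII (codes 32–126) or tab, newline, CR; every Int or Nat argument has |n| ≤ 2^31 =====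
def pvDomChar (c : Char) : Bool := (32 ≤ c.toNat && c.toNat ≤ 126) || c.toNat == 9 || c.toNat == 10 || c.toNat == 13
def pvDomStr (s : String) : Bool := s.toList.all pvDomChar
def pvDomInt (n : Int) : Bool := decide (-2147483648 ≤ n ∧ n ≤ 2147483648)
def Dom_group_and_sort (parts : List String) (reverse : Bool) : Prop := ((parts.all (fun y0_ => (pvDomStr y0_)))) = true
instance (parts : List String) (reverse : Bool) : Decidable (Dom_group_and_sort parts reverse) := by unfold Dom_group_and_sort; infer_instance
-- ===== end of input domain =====

-- B replaces A's index loop + comparison sort by an iterator pairing that fills a dict of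
-- per-unit buckets in one pass, then concatenates the buckets in unit-priority order
-- (reversed when reverse=True); a sort-free bucket gather, same practical cost class.

-- ===== PORT A =====
-- order = ["YEAR", ...]: A's local priority list
def pvOrder : List String := ["YEAR", "MONTH", "WEEK", "DAY", "HOUR", "MINUTE", "SECOND"]

-- order.index(u); total on Pre_ (u ∈ pvOrder), where index? is some
def pvKey (u : String) : Nat := (PySem.List.index? pvOrder u).getD 0

-- A's step-2 pairing loop: for i in range(0, len(parts), 2): append (parts[i], parts[i+1])
def pvPairs (parts : List String) : List (String × String) :=
  (PySem.List.pyRange 0 (parts.length : Int) 2).foldl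
    (fun acc i => acc ++ [(PySem.List.pyGetD parts i "", PySem.List.pyGetD parts (i + 1) "")]) []

def group_and_sort (parts : List String) (reverse : Bool) : List (String × String) :=
  PySem.List.sorted (pvPairs parts) (fun x => pvKey x.2) reverse

-- ===== PORT B =====
-- for name in it: unit = next(it); buckets[unit].append((name, unit)) — the iterator loop
-- consumes two elements per step (on Pre_ every unit is a dict key, so modify = append)
def bFill : List String → PySem.Dict String (List (String × String)) → PySem.Dict String (List (String × String))
  | a :: b :: rest, d => bFill rest (d.modify b [] (· ++ [(a, b)]))
  | _, d => d

-- buckets = {u: [] for u in order}; units = order[::-1] if reverse else order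
-- (order[::-1] is List.reverse: PySem.List.slice?_none_none_neg_one); [p for u in units for p in buckets[u]]
def group_and_sort_alt (parts : List String) (reverse : Bool) : List (String × String) :=
  let order : List String := ["YEAR", "MONTH", "WEEK", "DAY", "HOUR", "MINUTE", "SECOND"]
  let buckets := order.foldl (fun d u => d.insert u ([] : List (String × String))) PySem.Dict.empty
  let filled := bFill parts buckets
  let units := if reverse then order.reverse else order
  units.flatMap (fun u => PySem.Dict.getD filled u [])

-- ===== PRECONDITION & SPEC =====
-- Pre_ excludes exactly the inputs where A raises: odd-length lists (IndexError on parts[i+1])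
-- and lists whose odd-position entries are not all time units of the priority list (ValueError from order.index).
def Pre_group_and_sort (parts : List String) (reverse : Bool) : Prop :=
  parts.length % 2 = 0 ∧
  ∀ i (h : i < parts.length), i % 2 = 1 →
    parts[i] ∈ (["YEAR", "MONTH", "WEEK", "DAY", "HOUR", "MINUTE", "SECOND"] : List String)
instance (parts : List String) (reverse : Bool) : Decidable (Pre_group_and_sort parts reverse) := by
  unfold Pre_group_and_sort; infer_instance

def pvWitness_group_and_sort : List String × Bool :=
  (["1", "MONTH", "2", "YEAR", "3", "MONTH"], true)

def Spec_group_and_sort (parts : List String) (reverse : Bool) (out : List (String × String)) : Prop := out = group_and_sort_alt parts reverse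
instance (parts : List String) (reverse : Bool) (out : List (String × String)) : Decidable (Spec_group_and_sort parts reverse out) := by unfold Spec_group_and_sort; infer_instance

-- ===== CLAIM (what is proved, stated in full; the proofs are below) =====
def Claim_equal_group_and_sort : Prop := ∀ (parts : List String) (reverse : Bool), Dom_group_and_sort parts reverse → Pre_group_and_sort parts reverse → Spec_group_and_sort parts reverse (group_and_sort parts reverse)

-- ===== LEMMAS AND PROOFS =====

theorem insertBy_cons {α : Type} (b : α → α → Bool) (x y : α) (ys : List α) :
    PySem.List.insertBy b x (y :: ys)
      = if b x y then x :: y :: ys else y :: PySem.List.insertBy b x ys := rfl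

-- inserting x after a block where it never goes before, in front of a block where it always does
theorem ins_mid {α : Type} (b : α → α → Bool) (x : α) (l1 l2 : List α)
    (h1 : ∀ y ∈ l1, b x y = false) (h2 : ∀ y ∈ l2, b x y = true) :
    PySem.List.insertBy b x (l1 ++ l2) = l1 ++ x :: l2 := by
  induction l1 with
  | nil =>
    cases l2 with
    | nil => rfl
    | cons z zs => simp [insertBy_cons, h2 z (by simp)]
  | cons y ys ih =>
    have hy : b x y = false := h1 y (by simp)
    simp only [List.cons_append, insertBy_cons, hy, Bool.false_eq_true, if_false]
    simp [ih (fun y hy => h1 y (by simp [hy]))]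

theorem flatMap_congr_mem {α β : Type} (l : List α) (f g : α → List β)
    (h : ∀ x ∈ l, f x = g x) : l.flatMap f = l.flatMap g := by
  induction l with
  | nil => rfl
  | cons y ys ih =>
    simp only [List.flatMap_cons, h y (by simp), ih (fun x hx => h x (by simp [hx]))]

-- the generic one-step bucket insertion
theorem insertBy_step {α : Type} (key : α → Nat) (b : α → α → Bool) (x : α) (l : List α)
    (ks1 ks2 : List Nat)
    (hne1 : ∀ k ∈ ks1, k ≠ key x) (hne2 : ∀ k ∈ ks2, k ≠ key x)
    (hb1 : ∀ y, (key y ∈ ks1 ∨ key y = key x) → b x y = false)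
    (hb2 : ∀ y, key y ∈ ks2 → b x y = true) :
    PySem.List.insertBy b x
        ((ks1 ++ key x :: ks2).flatMap (fun k => l.filter (fun p => key p == k)))
      = (ks1 ++ key x :: ks2).flatMap (fun k => (l ++ [x]).filter (fun p => key p == k)) := by
  have hfx : ∀ k : Nat, k ≠ key x →
      (l ++ [x]).filter (fun p => key p == k) = l.filter (fun p => key p == k) := by
    intro k hk
    simp [List.filter_append, beq_iff_eq, Ne.symm hk]
  have hfx0 : (l ++ [x]).filter (fun p => key p == key x)
      = l.filter (fun p => key p == key x) ++ [x] := by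
    simp [List.filter_append]
  have e1 : ks1.flatMap (fun k => (l ++ [x]).filter (fun p => key p == k))
      = ks1.flatMap (fun k => l.filter (fun p => key p == k)) :=
    flatMap_congr_mem _ _ _ (fun k hk => hfx k (hne1 k hk))
  have e2 : ks2.flatMap (fun k => (l ++ [x]).filter (fun p => key p == k))
      = ks2.flatMap (fun k => l.filter (fun p => key p == k)) :=
    flatMap_congr_mem _ _ _ (fun k hk => hfx k (hne2 k hk))
  rw [List.flatMap_append, List.flatMap_append, List.flatMap_cons, List.flatMap_cons, e1, e2, hfx0]
  have hmid := ins_mid b x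
    ((ks1.flatMap (fun k => l.filter (fun p => key p == k)))
      ++ l.filter (fun p => key p == key x))
    (ks2.flatMap (fun k => l.filter (fun p => key p == k)))
    (by
      intro y hy
      rcases List.mem_append.1 hy with hy | hy
      · obtain ⟨k, hk, hyk⟩ := List.mem_flatMap.1 hy
        have hkey : key y = k := beq_iff_eq.1 (List.mem_filter.1 hyk).2
        exact hb1 y (Or.inl (hkey ▸ hk))
      · have hkey : key y = key x := beq_iff_eq.1 (List.mem_filter.1 hy).2
        exact hb1 y (Or.inr hkey))
    (by
      intro y hy
      obtain ⟨k, hk, hyk⟩ := List.mem_flatMap.1 hy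
      have hkey : key y = k := beq_iff_eq.1 (List.mem_filter.1 hyk).2
      exact hb2 y (hkey ▸ hk))
  simp only [List.append_assoc] at hmid ⊢
  rw [hmid]
  simp

-- splitting 0..6 at k0
theorem range7_split (k0 : Nat) (hk : k0 < 7) :
    List.range 7 = List.range' 0 k0 ++ k0 :: List.range' (k0 + 1) (6 - k0) := by
  rw [List.range_eq_range']
  have h1 : List.range' 0 k0 1 ++ List.range' (0 + 1 * k0) (7 - k0) 1
      = List.range' 0 (k0 + (7 - k0)) 1 := List.range'_append
  have h2 : k0 + (7 - k0) = 7 := by omega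
  have h3 : (7 - k0) = (6 - k0) + 1 := by omega
  rw [h2] at h1
  rw [← h1, h3, List.range'_succ]
  simp

-- A's stable sort with keys < 7 = concatenation of the key buckets (key order flipped when reverse)
theorem sorted_buckets {α : Type} (key : α → Nat) (l : List α) (h : ∀ p ∈ l, key p < 7) (rev : Bool) :
    PySem.List.sorted l key rev
      = (if rev then (List.range 7).reverse else List.range 7).flatMap
          (fun k => l.filter (fun p => key p == k)) := by
  cases rev with
  | false =>
    simp only [Bool.false_eq_true, if_false]
    rw [PySem.List.sorted_eq_foldl_insertBy]
    induction l using List.reverseRecOn with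
    | nil => simp
    | append_singleton l x ih =>
      have hl : ∀ p ∈ l, key p < 7 := fun p hp => h p (by simp [hp])
      rw [List.foldl_append, List.foldl_cons, List.foldl_nil, ih hl]
      have hk0 : key x < 7 := h x (by simp)
      rw [range7_split (key x) hk0]
      exact insertBy_step key _ x l _ _
        (fun k hk => by rw [List.mem_range'_1] at hk; omega)
        (fun k hk => by rw [List.mem_range'_1] at hk; omega)
        (fun y hy => by
          rcases hy with hy | hy
          · rw [List.mem_range'_1] at hy; simp; omega
          · simp; omega)
        (fun y hy => by rw [List.mem_range'_1] at hy; simp; omega)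
  | true =>
    simp only [if_pos]
    rw [PySem.List.sorted_rev_eq_foldl_insertBy]
    induction l using List.reverseRecOn with
    | nil => simp
    | append_singleton l x ih =>
      have hl : ∀ p ∈ l, key p < 7 := fun p hp => h p (by simp [hp])
      rw [List.foldl_append, List.foldl_cons, List.foldl_nil, ih hl]
      have hk0 : key x < 7 := h x (by simp)
      have hsplit : (List.range 7).reverse
          = (List.range' (key x + 1) (6 - key x)).reverse ++ key x :: (List.range' 0 (key x)).reverse := by
        rw [range7_split (key x) hk0]
        simp
      rw [hsplit]
      exact insertBy_step key _ x l _ _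
        (fun k hk => by rw [List.mem_reverse, List.mem_range'_1] at hk; omega)
        (fun k hk => by rw [List.mem_reverse, List.mem_range'_1] at hk; omega)
        (fun y hy => by
          rcases hy with hy | hy
          · rw [List.mem_reverse, List.mem_range'_1] at hy; simp; omega
          · simp; omega)
        (fun y hy => by rw [List.mem_reverse, List.mem_range'_1] at hy; simp; omega)

-- range(0, n, 2) peels its first element
theorem pyRange_two_cons (n : Int) (h : 0 < n) :
    PySem.List.pyRange 0 n 2 = 0 :: (PySem.List.pyRange 0 (n - 2) 2).map (· + 2) := by
  rw [PySem.List.pyRange_of_pos 0 n (by norm_num : (0:Int) < 2),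
      PySem.List.pyRange_of_pos 0 (n - 2) (by norm_num : (0:Int) < 2)]
  have hcnt : (if (0:Int) < n then ((n - 0 + 2 - 1) / 2).toNat else 0)
      = (if (0:Int) < n - 2 then ((n - 2 - 0 + 2 - 1) / 2).toNat else 0) + 1 := by
    split_ifs <;> omega
  rw [hcnt, List.range_succ_eq_map]
  simp [List.map_map, Function.comp_def]
  intro a _
  omega

-- proof-only helper: the pair list B's iterator loop walks through
def chunk2 : List String → List (String × String)
  | a :: b :: rest => (a, b) :: chunk2 rest
  | _ => []

-- A's pairing loop computes the iterator pairing, two elements at a time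
theorem pvPairs_cons_cons (a b : String) (rest : List String) :
    pvPairs (a :: b :: rest) = (a, b) :: pvPairs rest := by
  unfold pvPairs
  rw [PySem.List.foldl_append_singleton_eq_map, PySem.List.foldl_append_singleton_eq_map,
      List.nil_append, List.nil_append]
  have hlen : ((a :: b :: rest).length : Int) = (rest.length : Int) + 2 := by
    simp; omega
  rw [hlen, pyRange_two_cons _ (by omega)]
  have h2 : ((rest.length : Int) + 2 - 2) = (rest.length : Int) := by omega
  rw [h2, List.map_cons, List.map_map]
  congr 1
  · simp [PySem.List.pyGetD_of_nonneg, List.getD]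
  · apply List.map_congr_left
    intro i hi
    rw [PySem.List.mem_pyRange_iff_of_pos (by norm_num)] at hi
    obtain ⟨h0, _, _⟩ := hi
    simp only [Function.comp_def]
    have e1 : PySem.List.pyGetD (a :: b :: rest) (i + 2) "" = PySem.List.pyGetD rest i "" := by
      rw [PySem.List.pyGetD_of_nonneg _ _ (by omega), PySem.List.pyGetD_of_nonneg _ _ h0]
      have : (i + 2).toNat = i.toNat + 2 := by omega
      simp [this, List.getD]
    have e2 : PySem.List.pyGetD (a :: b :: rest) (i + 2 + 1) "" = PySem.List.pyGetD rest (i + 1) "" := by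
      rw [PySem.List.pyGetD_of_nonneg _ _ (by omega), PySem.List.pyGetD_of_nonneg _ _ (by omega)]
      have : (i + 2 + 1).toNat = (i + 1).toNat + 2 := by omega
      simp [this, List.getD]
    rw [e1, e2]

theorem pvPairs_eq_chunk2 (parts : List String) :
    parts.length % 2 = 0 → pvPairs parts = chunk2 parts := by
  induction parts using chunk2.induct with
  | case1 a b rest ih =>
    intro hlen
    rw [pvPairs_cons_cons, chunk2]
    simp only [List.length_cons] at hlen
    rw [ih (by omega)]
  | case2 t h1 =>
    intro hlen
    cases t with
    | nil => rfl
    | cons a t' =>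
      cases t' with
      | nil => simp at hlen
      | cons b rest => exact (h1 a b rest rfl).elim

theorem pvKey_lt (u : String) (hu : u ∈ pvOrder) : pvKey u < 7 := by
  fin_cases hu <;> decide

theorem pvPairs_snd_mem (parts : List String)
    (hlen : parts.length % 2 = 0)
    (hodd : ∀ i (h : i < parts.length), i % 2 = 1 →
      parts[i] ∈ (["YEAR", "MONTH", "WEEK", "DAY", "HOUR", "MINUTE", "SECOND"] : List String))
    (p : String × String) (hp : p ∈ pvPairs parts) : p.2 ∈ pvOrder := by
  unfold pvPairs at hp
  rw [PySem.List.foldl_append_singleton_eq_map, List.nil_append] at hp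
  obtain ⟨i, hi, rfl⟩ := List.mem_map.1 hp
  rw [PySem.List.mem_pyRange_iff_of_pos (by norm_num)] at hi
  obtain ⟨h0, hlt, hdvd⟩ := hi
  have hdvd' : (2 : Int) ∣ i := by simpa using hdvd
  have h1lt : i + 1 < (parts.length : Int) := by omega
  have h10 : (0 : Int) ≤ i + 1 := by omega
  rw [PySem.List.pyGetD_eq_getElem parts "" h10 h1lt]
  have hj : (i + 1).toNat % 2 = 1 := by omega
  have hjlt : (i + 1).toNat < parts.length := by omega
  exact hodd (i + 1).toNat hjlt hj

-- the bucket-filling loop: each key's bucket collects its filtered pairs, in order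
theorem bFill_getD (l : List String) (d : PySem.Dict String (List (String × String))) (u : String) :
    PySem.Dict.getD (bFill l d) u [] = PySem.Dict.getD d u [] ++ (chunk2 l).filter (fun p => p.2 == u) := by
  induction l, d using bFill.induct with
  | case1 a b rest d ih =>
    rw [bFill, chunk2, ih, PySem.Dict.getD_modify]
    by_cases hub : u = b
    · simp [hub]
    · simp [hub, Ne.symm hub, beq_iff_eq]
  | case2 t d h1 =>
    cases t with
    | nil => simp [bFill, chunk2]
    | cons a t' =>
      cases t' with
      | nil => simp [bFill, chunk2]
      | cons b rest => exact (h1 a b rest rfl).elim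

-- the dict comprehension {u: [] for u in order} holds an empty bucket under every key
theorem buckets0_getD (u : String) :
    PySem.Dict.getD
      ((["YEAR", "MONTH", "WEEK", "DAY", "HOUR", "MINUTE", "SECOND"] : List String).foldl
        (fun d u => d.insert u ([] : List (String × String))) PySem.Dict.empty) u []
      = [] := by
  simp only [List.foldl_cons, List.foldl_nil, PySem.Dict.getD_insert, PySem.Dict.getD_empty]
  split_ifs <;> rfl

-- pvKey-bucket k = unit-bucket order[k], on pairs whose unit is a listed unit
theorem filter_key_eq_filter_unit (l : List (String × String))
    (h : ∀ p ∈ l, p.2 ∈ pvOrder) (k : Nat) (hk : k < 7) :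
    l.filter (fun p => pvKey p.2 == k) = l.filter (fun p => p.2 == pvOrder.getD k "") := by
  apply List.filter_congr
  intro p hp
  obtain ⟨x, u⟩ := p
  have hu : u ∈ pvOrder := h (x, u) hp
  show (pvKey u == k) = (u == pvOrder.getD k "")
  fin_cases hu <;> interval_cases k <;> decide

-- ===== VERDICT (by name: the statement is the Claim_ definition above) =====
theorem group_and_sort_spec : Claim_equal_group_and_sort := by
  intro parts reverse _ hpre
  obtain ⟨hlen, hodd⟩ := hpre
  unfold Spec_group_and_sort group_and_sort group_and_sort_alt
  have hmem : ∀ p ∈ pvPairs parts, p.2 ∈ pvOrder :=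
    fun p hp => pvPairs_snd_mem parts hlen hodd p hp
  have hkey : ∀ p ∈ pvPairs parts, (fun x : String × String => pvKey x.2) p < 7 :=
    fun p hp => pvKey_lt p.2 (hmem p hp)
  rw [sorted_buckets _ _ hkey reverse]
  have hfill : ∀ u : String,
      PySem.Dict.getD (bFill parts
        ((["YEAR", "MONTH", "WEEK", "DAY", "HOUR", "MINUTE", "SECOND"] : List String).foldl
          (fun d u => d.insert u ([] : List (String × String))) PySem.Dict.empty)) u []
        = (pvPairs parts).filter (fun p => p.2 == u) := by
    intro u
    rw [bFill_getD, buckets0_getD, List.nil_append, pvPairs_eq_chunk2 parts hlen]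
  cases reverse with
  | false =>
    simp only [Bool.false_eq_true, if_false]
    have h7 : List.range 7 = [0, 1, 2, 3, 4, 5, 6] := by decide
    rw [h7]
    simp only [List.flatMap_cons, List.flatMap_nil, List.append_nil, hfill]
    rw [filter_key_eq_filter_unit _ hmem 0 (by omega),
        filter_key_eq_filter_unit _ hmem 1 (by omega),
        filter_key_eq_filter_unit _ hmem 2 (by omega),
        filter_key_eq_filter_unit _ hmem 3 (by omega),
        filter_key_eq_filter_unit _ hmem 4 (by omega),
        filter_key_eq_filter_unit _ hmem 5 (by omega),
        filter_key_eq_filter_unit _ hmem 6 (by omega)]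
    rfl
  | true =>
    simp only [if_pos]
    have h7 : (List.range 7).reverse = [6, 5, 4, 3, 2, 1, 0] := by decide
    have hrev : (["YEAR", "MONTH", "WEEK", "DAY", "HOUR", "MINUTE", "SECOND"] : List String).reverse
        = ["SECOND", "MINUTE", "HOUR", "DAY", "WEEK", "MONTH", "YEAR"] := by rfl
    rw [h7, hrev]
    simp only [List.flatMap_cons, List.flatMap_nil, List.append_nil, hfill]
    rw [filter_key_eq_filter_unit _ hmem 0 (by omega),
        filter_key_eq_filter_unit _ hmem 1 (by omega),
        filter_key_eq_filter_unit _ hmem 2 (by omega),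
        filter_key_eq_filter_unit _ hmem 3 (by omega),
        filter_key_eq_filter_unit _ hmem 4 (by omega),
        filter_key_eq_filter_unit _ hmem 5 (by omega),
        filter_key_eq_filter_unit _ hmem 6 (by omega)]
    rfl
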